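-- pv_equiv track=rewrite | github.com/P156HAM/Youtube-Automation-with-Python | src/audio/mixer.py | calculate_sfx_timestamps
-- ===== SOURCE A (Python) =====
-- from typing import List, Optional, Tuple, Union
--
-- def calculate_sfx_timestamps(
--
--     num_messages: int,
--     message_duration_ms: int,
--     typing_duration_ms: int,
--     skip_first: bool = True
-- ) -> List[int]:
--     """
--     Calculate timestamps for notification sounds based on message timing.
--
--     Args:
--         num_messages: Number of messages in the video
--         message_duration_ms: Duration each message is shown
--         typing_duration_ms: Duration of typing indicator
--         skip_first: Whether to skip sound for first message
--
--     Returns: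
--         List of timestamps in milliseconds
--     """
--     timestamps = []
--     current_time = 0
--
--     for i in range(num_messages):
--         if i > 0:
--             # Add typing duration
--             current_time += typing_duration_ms
--
--         # Play notification when message appears
--         if not (skip_first and i == 0):
--             timestamps.append(current_time)
--
--         # Add message display duration
--         current_time += message_duration_ms
--
--     return timestamps
-- ===== SOURCE B (Python) =====
-- from typing import List
--
-- def calculate_sfx_timestamps(
--     num_messages: int,
--     message_duration_ms: int,
--     typing_duration_ms: int,
--     skip_first: bool = True
-- ) -> List[int]:
--     step = message_duration_ms + typing_duration_ms
--     start = 1 if skip_first else 0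
--     return [i * step for i in range(start, num_messages)]
-- ===== Notes on version B (the rewrite author's own statement) =====
-- stated objective: simpler
-- what changed: Replaced the running-time accumulator loop with per-iteration branches by the closed form i*(message_duration_ms+typing_duration_ms) mapped over a flag-chosen index range.
import Mathlib
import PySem

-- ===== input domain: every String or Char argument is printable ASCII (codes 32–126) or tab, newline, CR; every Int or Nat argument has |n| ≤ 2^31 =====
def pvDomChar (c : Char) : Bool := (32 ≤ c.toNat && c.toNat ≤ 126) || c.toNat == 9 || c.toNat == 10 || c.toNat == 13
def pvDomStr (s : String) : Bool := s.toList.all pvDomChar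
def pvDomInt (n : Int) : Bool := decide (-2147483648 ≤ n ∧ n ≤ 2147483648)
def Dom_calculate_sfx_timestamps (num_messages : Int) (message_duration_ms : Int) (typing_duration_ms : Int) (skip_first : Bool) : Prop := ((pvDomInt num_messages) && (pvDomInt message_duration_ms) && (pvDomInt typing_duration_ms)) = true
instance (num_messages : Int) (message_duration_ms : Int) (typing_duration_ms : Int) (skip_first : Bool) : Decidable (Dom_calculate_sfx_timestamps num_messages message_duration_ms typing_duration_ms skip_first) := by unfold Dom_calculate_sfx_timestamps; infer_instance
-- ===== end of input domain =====

-- B replaces A's running-time accumulator and per-iteration branches by the closed form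
-- i*(message_duration_ms+typing_duration_ms) over a flag-chosen index range (objective: simpler).

-- ===== PORT A =====
-- literal transliteration of A's loop: state = (timestamps, current_time)
def calculate_sfx_timestamps (num_messages : Int) (message_duration_ms : Int) (typing_duration_ms : Int) (skip_first : Bool) : List Int :=
  ((PySem.List.pyRange 0 num_messages 1).foldl
    (fun (st : List Int × Int) (i : Int) =>
      let current_time := if 0 < i then st.2 + typing_duration_ms else st.2
      let timestamps := if ¬ (skip_first = true ∧ i = 0) then st.1 ++ [current_time] else st.1
      (timestamps, current_time + message_duration_ms))
    ([], 0)).1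

-- ===== PORT B =====
def calculate_sfx_timestamps_alt (num_messages : Int) (message_duration_ms : Int) (typing_duration_ms : Int) (skip_first : Bool) : List Int :=
  let step := message_duration_ms + typing_duration_ms
  let start : Int := if skip_first then 1 else 0
  (PySem.List.pyRange start num_messages 1).map (fun i => i * step)

-- ===== PRECONDITION & SPEC =====
def Spec_calculate_sfx_timestamps (num_messages : Int) (message_duration_ms : Int) (typing_duration_ms : Int) (skip_first : Bool) (out : List Int) : Prop := out = calculate_sfx_timestamps_alt num_messages message_duration_ms typing_duration_ms skip_first
instance (num_messages : Int) (message_duration_ms : Int) (typing_duration_ms : Int) (skip_first : Bool) (out : List Int) : Decidable (Spec_calculate_sfx_timestamps num_messages message_duration_ms typing_duration_ms skip_first out) := by unfold Spec_calculate_sfx_timestamps; infer_instance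

-- ===== CLAIM (what is proved, stated in full; the proofs are below) =====
def Claim_equal_calculate_sfx_timestamps : Prop := ∀ (num_messages : Int) (message_duration_ms : Int) (typing_duration_ms : Int) (skip_first : Bool), Dom_calculate_sfx_timestamps num_messages message_duration_ms typing_duration_ms skip_first → Spec_calculate_sfx_timestamps num_messages message_duration_ms typing_duration_ms skip_first (calculate_sfx_timestamps num_messages message_duration_ms typing_duration_ms skip_first)

-- ===== LEMMAS AND PROOFS =====


theorem foldA_false (m t : Int) (N : Nat) :
    ((List.range N).map (fun k : Nat => ((0:Int) + (k:Int)))).foldl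
      (fun (st : List Int × Int) (i : Int) =>
        let current_time := if 0 < i then st.2 + t else st.2
        let timestamps := if ¬ (false = true ∧ i = 0) then st.1 ++ [current_time] else st.1
        (timestamps, current_time + m))
      ([], 0)
    = ( (List.range N).map (fun k : Nat => (k:Int) * (m + t)),
        (N:Int) * m + ((N - 1 : Nat):Int) * t ) := by
  induction N with
  | zero => simp
  | succ N ih =>
    rw [List.range_succ, List.map_append, List.foldl_append, ih]
    by_cases hN : N = 0
    · subst hN; simp
    · have hc : ((N - 1 : Nat):Int) = (N:Int) - 1 := by omega
      have h0 : (0:Int) < 0 + (N:Int) := by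
        have := Nat.pos_of_ne_zero hN; omega
      simp only [List.map_cons, List.map_nil, List.map_append, List.foldl_cons, List.foldl_nil,
        if_pos h0, Nat.add_sub_cancel, hc, Prod.mk.injEq]
      constructor
      · simp; ring
      · push_cast [hc]; ring

theorem foldA_true (m t : Int) (N : Nat) :
    ((List.range N).map (fun k : Nat => ((0:Int) + (k:Int)))).foldl
      (fun (st : List Int × Int) (i : Int) =>
        let current_time := if 0 < i then st.2 + t else st.2
        let timestamps := if ¬ (true = true ∧ i = 0) then st.1 ++ [current_time] else st.1
        (timestamps, current_time + m))
      ([], 0)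
    = ( (List.range (N - 1)).map (fun k : Nat => ((k:Int) + 1) * (m + t)),
        (N:Int) * m + ((N - 1 : Nat):Int) * t ) := by
  induction N with
  | zero => simp
  | succ N ih =>
    rw [List.range_succ, List.map_append, List.foldl_append, ih]
    by_cases hN : N = 0
    · subst hN; simp
    · have hc : ((N - 1 : Nat):Int) = (N:Int) - 1 := by omega
      have h0 : (0:Int) < 0 + (N:Int) := by
        have := Nat.pos_of_ne_zero hN; omega
      have hne : ¬ ((0:Int) + (N:Int) = 0) := by
        have := Nat.pos_of_ne_zero hN; omega
      rw [show (N + 1) - 1 = (N - 1) + 1 from by omega, List.range_succ, List.map_append]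
      simp only [List.map_cons, List.map_nil, List.foldl_cons, List.foldl_nil, if_pos h0,
        true_and, hne, not_false_eq_true, if_true, hc, Prod.mk.injEq]
      constructor
      · simp; ring
      · push_cast [hc]; ring

theorem pyRange_zero_eq (n : Int) :
    PySem.List.pyRange 0 n 1 = (List.range n.toNat).map (fun k : Nat => ((0:Int) + (k:Int))) := by
  rw [PySem.List.pyRange_one]; simp

-- ===== VERDICT (by name: the statement is the Claim_ definition above) =====
theorem calculate_sfx_timestamps_spec : Claim_equal_calculate_sfx_timestamps := by
  intro n m t skip _
  show _ = _
  unfold calculate_sfx_timestamps calculate_sfx_timestamps_alt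
  rw [pyRange_zero_eq]
  cases skip
  · rw [foldA_false]
    simp only [PySem.List.pyRange_one]
    simp [List.map_map, Function.comp]
  · rw [foldA_true]
    simp only [PySem.List.pyRange_one]
    have h1 : (n - 1).toNat = n.toNat - 1 := by omega
    simp [h1, List.map_map, Function.comp]
    intro a _
    exact Or.inl (by ring)
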